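-- pv_equiv track=rewrite | github.com/Arshad-ahmedk/Training | BalancedSubArray.py | longest_equal_boys_girls
-- ===== SOURCE A (Python) =====
-- def longest_equal_boys_girls(s: str) -> int:
--     vowels=['a', 'e', 'i', 'o', 'u']
--     prefix_sum = 0
--     seen = {0: -1}
--     max_len = 0
--
--     for i, ch in enumerate(s):
--         prefix_sum += 1 if ch.lower() in vowels else -1
--
--         if prefix_sum in seen:
--             max_len = max(max_len, i - seen[prefix_sum])
--         else:
--             seen[prefix_sum] = i
--
--     return max_len
-- ===== SOURCE B (Python) =====
-- def longest_equal_boys_girls(s: str) -> int: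
--     vowels = ['a', 'e', 'i', 'o', 'u']
--     max_len = 0
--     for i in range(len(s)):
--         bal = 0
--         length = 0
--         for ch in s[i:]:
--             length += 1
--             bal += 1 if ch.lower() in vowels else -1
--             if bal == 0:
--                 max_len = max(max_len, length)
--     return max_len
-- ===== Notes on version B (the rewrite author's own statement) =====
-- stated objective: alternative
-- what changed: Replaced the prefix-sum-plus-first-occurrence hashmap single pass with a plain brute-force double loop that keeps a running balance from each start index and records every balanced window directly, needing no auxiliary dictionary.
import Mathlib
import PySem

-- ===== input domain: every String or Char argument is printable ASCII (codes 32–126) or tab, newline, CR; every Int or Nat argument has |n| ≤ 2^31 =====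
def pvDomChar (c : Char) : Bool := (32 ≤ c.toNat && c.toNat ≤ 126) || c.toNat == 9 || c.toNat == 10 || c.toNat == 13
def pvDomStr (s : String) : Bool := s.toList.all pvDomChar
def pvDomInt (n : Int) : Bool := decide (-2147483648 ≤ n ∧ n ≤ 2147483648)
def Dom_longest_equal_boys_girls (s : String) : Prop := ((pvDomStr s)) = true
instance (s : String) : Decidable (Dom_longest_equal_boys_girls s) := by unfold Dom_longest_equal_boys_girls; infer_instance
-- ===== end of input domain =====

-- B replaces A's prefix-sum + first-occurrence hashmap single pass by a plain brute-force
-- double loop (running balance from every start index); objective: alternative (not faster).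

-- ===== PORT A =====
-- `ch.lower() in vowels` (one-char strings) is ported at Char level: PySem.Chars.lowerChar
-- is exact for single ASCII characters, membership in the list of vowel chars.
def pvVowel (ch : Char) : Bool := decide (PySem.Chars.lowerChar ch ∈ ['a', 'e', 'i', 'o', 'u'])

-- the body of A's `for i, ch in enumerate(s)` loop, state (prefix_sum, seen, max_len)
def pvStepA (st : Int × PySem.Dict Int Int × Int) (p : Int × Char) :
    Int × PySem.Dict Int Int × Int :=
  let ps := st.1 + (if pvVowel p.2 then 1 else -1)
  if st.2.1.contains ps then
    (ps, st.2.1, max st.2.2 (p.1 - st.2.1.getD ps 0))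
  else
    (ps, st.2.1.insert ps p.1, st.2.2)

def longest_equal_boys_girls (s : String) : Int :=
  ((PySem.List.enumerate s.toList 0).foldl pvStepA
    (0, PySem.Dict.ofList [((0 : Int), (-1 : Int))], 0)).2.2

-- ===== PORT B =====
-- the body of B's `for ch in s[i:]` loop, state (length, bal, max_len)
def pvStepB (st : Int × Int × Int) (ch : Char) : Int × Int × Int :=
  let length := st.1 + 1
  let bal := st.2.1 + (if pvVowel ch then 1 else -1)
  (length, bal, if bal = 0 then max st.2.2 length else st.2.2)

def longest_equal_boys_girls_alt (s : String) : Int :=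
  (PySem.List.pyRange 0 (PySem.Str.len s) 1).foldl
    (fun ml i =>
      ((PySem.List.slice s.toList (some i) none).foldl pvStepB (0, 0, ml)).2.2)
    0

-- ===== PRECONDITION & SPEC =====
def Spec_longest_equal_boys_girls (s : String) (out : Int) : Prop := out = longest_equal_boys_girls_alt s
instance (s : String) (out : Int) : Decidable (Spec_longest_equal_boys_girls s out) := by unfold Spec_longest_equal_boys_girls; infer_instance

-- ===== CLAIM (what is proved, stated in full; the proofs are below) =====
def Claim_equal_longest_equal_boys_girls : Prop := ∀ (s : String), Dom_longest_equal_boys_girls s → Spec_longest_equal_boys_girls s (longest_equal_boys_girls s)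

-- ===== LEMMAS AND PROOFS =====

-- weight of a character (+1 vowel, -1 otherwise) and sums of weights
def pvS (l : List Char) : Int := (l.map (fun ch => if pvVowel ch then 1 else -1)).sum

-- prefix sum of the first k characters of t
def pvQ (t : List Char) (k : ℕ) : Int := pvS (t.take k)

-- m is the length of some balanced window of t
def pvPair (t : List Char) (m : Int) : Prop :=
  ∃ a b : ℕ, a < b ∧ b ≤ t.length ∧ pvQ t a = pvQ t b ∧ m = (b : Int) - (a : Int)

-- m is THE maximum balanced-window length of t (0 if none)
def pvGood (t : List Char) (m : Int) : Prop :=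
  0 ≤ m ∧ (m = 0 ∨ pvPair t m) ∧
    ∀ a b : ℕ, a < b → b ≤ t.length → pvQ t a = pvQ t b → (b : Int) - (a : Int) ≤ m

lemma pvGood_unique {t : List Char} {m m' : Int} (h : pvGood t m) (h' : pvGood t m') :
    m = m' := by
  obtain ⟨hm0, hmem, hub⟩ := h
  obtain ⟨hm0', hmem', hub'⟩ := h'
  have h1 : m ≤ m' := by
    rcases hmem with h | ⟨a, b, hab, hb, hq, rfl⟩
    · omega
    · exact hub' a b hab hb hq
  have h2 : m' ≤ m := by
    rcases hmem' with h | ⟨a, b, hab, hb, hq, rfl⟩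
    · omega
    · exact hub a b hab hb hq
  omega

lemma pvQ_succ (t : List Char) (k : ℕ) (hk : k < t.length) :
    pvQ t (k + 1) = pvQ t k + (if pvVowel t[k] then 1 else -1) := by
  have h : t.take (k + 1) = t.take k ++ [t[k]] := by
    rw [List.take_add_one, List.getElem?_eq_getElem hk]; rfl
  rw [pvQ, pvQ, h, pvS, pvS, List.map_append, List.sum_append,
    List.map_cons, List.map_nil, List.sum_cons, List.sum_nil, add_zero]

lemma pvQ_add (t : List Char) (k c : ℕ) :
    pvQ t (k + c) = pvQ t k + pvS ((t.drop k).take c) := by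
  simp [pvQ, pvS, List.take_add]

-- ===== A side =====

-- first index k ≤ np with pvQ t k = v, stored Python-style as k - 1
def pvFirstOcc (t : List Char) (np : ℕ) (v : Int) : Option Int :=
  match (List.range (np + 1)).find? (fun k => pvQ t k == v) with
  | some k => some ((k : Int) - 1)
  | none => none

lemma pvFirstOcc_isSome_iff (t : List Char) (np : ℕ) (v : Int) :
    (pvFirstOcc t np v).isSome ↔ ∃ k, k ≤ np ∧ pvQ t k = v := by
  unfold pvFirstOcc
  cases hf : (List.range (np + 1)).find? (fun k => pvQ t k == v) with
  | none =>
    rw [List.find?_eq_none] at hf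
    simp only [Option.isSome_none, Bool.false_eq_true, false_iff]
    rintro ⟨k, hk, hq⟩
    exact hf k (by simp [List.mem_range]; omega) (by simpa using hq)
  | some k =>
    simp only [Option.isSome_some, true_iff]
    exact ⟨k, by simpa [Nat.lt_succ_iff] using List.mem_of_find?_eq_some hf,
      by simpa using List.find?_some hf⟩

lemma pvFirstOcc_spec (t : List Char) (np : ℕ) (v : Int) (x : Int)
    (h : pvFirstOcc t np v = some x) :
    ∃ k0 : ℕ, x = (k0 : Int) - 1 ∧ k0 ≤ np ∧ pvQ t k0 = v ∧ ∀ j < k0, pvQ t j ≠ v := by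
  unfold pvFirstOcc at h
  cases hf : (List.range (np + 1)).find? (fun k => pvQ t k == v) with
  | none => rw [hf] at h; exact absurd h (by simp)
  | some k0 =>
    rw [hf] at h
    have hx : x = (k0 : Int) - 1 := by simpa using h.symm
    refine ⟨k0, hx, ?_, ?_, ?_⟩
    · have := List.mem_of_find?_eq_some hf
      simpa [Nat.lt_succ_iff] using this
    · have := List.find?_some hf
      simpa using this
    · rw [List.find?_eq_some_iff_getElem] at hf
      obtain ⟨hp, i, hi, hgi, hmin⟩ := hf
      have hik : i = k0 := by simpa [List.getElem_range] using hgi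
      intro j hj
      have := hmin j (by omega)
      simpa [List.getElem_range] using this

lemma pvFirstOcc_succ_of_isSome (t : List Char) (np : ℕ) (v : Int)
    (h : (pvFirstOcc t np v).isSome) :
    pvFirstOcc t (np + 1) v = pvFirstOcc t np v := by
  unfold pvFirstOcc at *
  rw [List.range_succ, List.find?_append]
  cases hf : (List.range (np + 1)).find? (fun k => pvQ t k == v) with
  | none => rw [hf] at h; simp at h
  | some k => simp [Option.some_or]

lemma pvFirstOcc_succ_of_none (t : List Char) (np : ℕ) (v : Int)
    (h : pvFirstOcc t np v = none) :
    pvFirstOcc t (np + 1) v = (if pvQ t (np + 1) = v then some ((np : Int)) else none) := by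
  have hf : (List.range (np + 1)).find? (fun k => pvQ t k == v) = none := by
    cases hf' : (List.range (np + 1)).find? (fun k => pvQ t k == v) with
    | none => rfl
    | some k => unfold pvFirstOcc at h; rw [hf'] at h; exact absurd h (by simp)
  unfold pvFirstOcc
  rw [List.range_succ, List.find?_append, hf, Option.none_or]
  by_cases hq : pvQ t (np + 1) = v
  · rw [if_pos hq]
    simp [hq]
  · rw [if_neg hq]
    simp [hq]

-- A's loop invariant, by induction on the remaining suffix
lemma pvA_loop (t : List Char) (r : List Char) (np : ℕ) (seen : PySem.Dict Int Int)
    (ml : Int)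
    (hdrop : t.drop np = r)
    (hseen : ∀ v, seen.get? v = pvFirstOcc t np v)
    (hml0 : 0 ≤ ml)
    (hmem : ml = 0 ∨ pvPair t ml)
    (hub : ∀ a b : ℕ, a < b → b ≤ np → pvQ t a = pvQ t b → (b : Int) - (a : Int) ≤ ml) :
    pvGood t ((PySem.List.enumerate r (np : Int)).foldl pvStepA (pvQ t np, seen, ml)).2.2 := by
  induction r generalizing np seen ml with
  | nil =>
    have hlen : t.length ≤ np := by
      have := congrArg List.length hdrop
      simp at this; omega
    simp only [PySem.List.enumerate_nil, List.foldl_nil]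
    exact ⟨hml0, hmem, fun a b hab hb hq => hub a b hab (le_trans hb hlen) hq⟩
  | cons ch r' ih =>
    have hlen : np + r'.length + 1 = t.length := by
      have := congrArg List.length hdrop
      simp at this; omega
    have hnp : np < t.length := by omega
    have hget : t[np] = ch := by
      have h0 : (t.drop np)[0]'(by simp; omega) = ch := by
        simp [hdrop]
      rw [List.getElem_drop] at h0
      simpa using h0
    have hdrop' : t.drop (np + 1) = r' := by
      have htl : (t.drop np).tail = r' := by rw [hdrop]; rfl
      rw [← htl, List.tail_drop]
    have hps : pvQ t np + (if pvVowel ch then 1 else -1) = pvQ t (np + 1) := by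
      rw [pvQ_succ t np hnp, hget]
    have hcast : ((np : Int)) + 1 = ((np + 1 : ℕ) : Int) := by push_cast; ring
    rw [PySem.List.enumerate_cons, List.foldl_cons]
    have hstep : pvStepA (pvQ t np, seen, ml) ((np : Int), ch) =
        (if seen.contains (pvQ t (np + 1)) then
          (pvQ t (np + 1), seen, max ml ((np : Int) - seen.getD (pvQ t (np + 1)) 0))
        else (pvQ t (np + 1), seen.insert (pvQ t (np + 1)) ((np : Int)), ml)) := by
      simp only [pvStepA, hps]
    rw [hstep]
    by_cases hc : seen.contains (pvQ t (np + 1))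
    · rw [if_pos hc]
      have hsome : (pvFirstOcc t np (pvQ t (np + 1))).isSome := by
        have hce := PySem.Dict.contains_eq_isSome_get? (d := seen) (k := pvQ t (np + 1))
        rw [hseen, hc] at hce
        exact hce.symm
      obtain ⟨x, hxeq⟩ := Option.isSome_iff_exists.mp hsome
      obtain ⟨k0, hx, hk0np, hk0q, hk0min⟩ := pvFirstOcc_spec t np _ x hxeq
      have hgetD : seen.getD (pvQ t (np + 1)) 0 = (k0 : Int) - 1 := by
        rw [PySem.Dict.getD_eq_get?_getD, hseen, hxeq, hx]; rfl
      rw [hgetD, hcast]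
      apply ih (np + 1) seen (max ml ((np : Int) - ((k0 : Int) - 1))) hdrop'
      · intro v
        by_cases hsv : (pvFirstOcc t np v).isSome
        · rw [pvFirstOcc_succ_of_isSome _ _ _ hsv, hseen]
        · have hn := Option.not_isSome_iff_eq_none.mp hsv
          rw [hseen, hn, pvFirstOcc_succ_of_none _ _ _ hn, if_neg]
          intro hqv
          rw [← hqv] at hn
          rw [hn] at hsome
          exact absurd hsome (by simp)
      · exact le_trans hml0 (le_max_left _ _)
      · rcases max_choice ml ((np : Int) - ((k0 : Int) - 1)) with hm | hm
        · rw [hm]; exact hmem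
        · right
          rw [hm]
          exact ⟨k0, np + 1, by omega, by omega, by rw [hk0q], by push_cast; ring⟩
      · intro a b hab hb hq
        by_cases hbnp : b ≤ np
        · exact le_trans (hub a b hab hbnp hq) (le_max_left _ _)
        · have hbeq : b = np + 1 := by omega
          subst hbeq
          have hk0a : k0 ≤ a := by
            by_contra hlt
            exact hk0min a (by omega) (by rw [hq])
          have := le_max_right ml ((np : Int) - ((k0 : Int) - 1))
          omega
    · rw [if_neg hc]
      have hnone : pvFirstOcc t np (pvQ t (np + 1)) = none := by
        have hcf : seen.contains (pvQ t (np + 1)) = false := by simpa using hc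
        have hce := PySem.Dict.contains_eq_isSome_get? (d := seen) (k := pvQ t (np + 1))
        rw [hseen, hcf] at hce
        exact Option.not_isSome_iff_eq_none.mp (by rw [← hce]; simp)
      rw [hcast]
      apply ih (np + 1) (seen.insert (pvQ t (np + 1)) ((np : Int))) ml hdrop'
      · intro v
        by_cases hv : v = pvQ t (np + 1)
        · subst hv
          rw [PySem.Dict.get?_insert_self, pvFirstOcc_succ_of_none _ _ _ hnone, if_pos rfl]
        · rw [PySem.Dict.get?_insert, if_neg hv, hseen]
          by_cases hsv : (pvFirstOcc t np v).isSome
          · rw [pvFirstOcc_succ_of_isSome _ _ _ hsv]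
          · have hn := Option.not_isSome_iff_eq_none.mp hsv
            rw [hn, pvFirstOcc_succ_of_none _ _ _ hn, if_neg (fun hqv => hv hqv.symm)]
      · exact hml0
      · exact hmem
      · intro a b hab hb hq
        by_cases hbnp : b ≤ np
        · exact hub a b hab hbnp hq
        · have hbeq : b = np + 1 := by omega
          subst hbeq
          have : (pvFirstOcc t np (pvQ t (np + 1))).isSome := by
            rw [pvFirstOcc_isSome_iff]
            exact ⟨a, by omega, by rw [hq]⟩
          rw [hnone] at this
          exact absurd this (by simp)

-- ===== B side =====

lemma pvB_inner_le (l : List Char) (st : Int × Int × Int) :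
    st.2.2 ≤ (l.foldl pvStepB st).2.2 := by
  induction l generalizing st with
  | nil => simp
  | cons ch l ih =>
    refine le_trans ?_ (ih (pvStepB st ch))
    simp only [pvStepB]
    split <;> split <;> first
      | exact le_max_left _ _
      | exact le_refl _

lemma pvB_inner_ub (l : List Char) (len0 bal0 ml : Int) (c : ℕ)
    (hc1 : 1 ≤ c) (hc2 : c ≤ l.length) (hz : bal0 + pvS (l.take c) = 0) :
    len0 + (c : Int) ≤ (l.foldl pvStepB (len0, bal0, ml)).2.2 := by
  induction l generalizing len0 bal0 ml c with
  | nil => simp at hc2; omega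
  | cons ch l ih =>
    simp only [List.foldl_cons, pvStepB]
    cases c with
    | zero => omega
    | succ c' =>
      rcases Nat.eq_zero_or_pos c' with h0 | hpos
      · subst h0
        have hw : bal0 + (if pvVowel ch then 1 else -1) = 0 := by
          simpa [pvS] using hz
        rw [if_pos hw]
        have := pvB_inner_le l (len0 + 1, bal0 + (if pvVowel ch then 1 else -1),
          max ml (len0 + 1))
        simp only at this
        push_cast
        calc len0 + 1 ≤ max ml (len0 + 1) := le_max_right _ _
          _ ≤ _ := this
      · have htake : pvS ((ch :: l).take (c' + 1)) =
            (if pvVowel ch then 1 else -1) + pvS (l.take c') := by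
          simp [pvS]
        have hz' : (bal0 + (if pvVowel ch then 1 else -1)) + pvS (l.take c') = 0 := by
          rw [htake] at hz; omega
        have hgoal := ih (len0 + 1) (bal0 + (if pvVowel ch then 1 else -1))
          (if bal0 + (if pvVowel ch then 1 else -1) = 0 then max ml (len0 + 1) else ml)
          c' hpos (by simp at hc2; omega) hz'
        push_cast at hgoal ⊢
        omega

lemma pvB_inner_mem (l : List Char) (len0 bal0 ml : Int) :
    (l.foldl pvStepB (len0, bal0, ml)).2.2 = ml ∨
      ∃ c : ℕ, 1 ≤ c ∧ c ≤ l.length ∧ bal0 + pvS (l.take c) = 0 ∧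
        (l.foldl pvStepB (len0, bal0, ml)).2.2 = len0 + (c : Int) := by
  induction l generalizing len0 bal0 ml with
  | nil => left; rfl
  | cons ch l ih =>
    simp only [List.foldl_cons, pvStepB]
    have htake : ∀ c' : ℕ, pvS ((ch :: l).take (c' + 1)) =
        (if pvVowel ch then 1 else -1) + pvS (l.take c') := by
      intro c'; simp [pvS]
    by_cases hw : bal0 + (if pvVowel ch then 1 else -1) = 0
    · rw [if_pos hw]
      rcases ih (len0 + 1) (bal0 + (if pvVowel ch then 1 else -1)) (max ml (len0 + 1)) with
        heq | ⟨c', hc1, hc2, hz, heq⟩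
      · rcases max_choice ml (len0 + 1) with hm | hm
        · left; rw [heq, hm]
        · right
          refine ⟨1, le_refl 1, by simp, by simpa [pvS] using hw, ?_⟩
          rw [heq, hm]; push_cast; ring
      · right
        refine ⟨c' + 1, by omega, by simp; omega, ?_, ?_⟩
        · rw [htake c']; omega
        · rw [heq]; push_cast; ring
    · rw [if_neg hw]
      rcases ih (len0 + 1) (bal0 + (if pvVowel ch then 1 else -1)) ml with
        heq | ⟨c', hc1, hc2, hz, heq⟩
      · left; exact heq
      · right
        refine ⟨c' + 1, by omega, by simp; omega, ?_, ?_⟩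
        · rw [htake c']; omega
        · rw [heq]; push_cast; ring

-- B's outer loop, by induction on N
lemma pvB_outer (t : List Char) (N : ℕ) :
    0 ≤ (List.range N).foldl
        (fun ml k => ((t.drop k).foldl pvStepB (0, 0, ml)).2.2) 0 ∧
    ((List.range N).foldl
        (fun ml k => ((t.drop k).foldl pvStepB (0, 0, ml)).2.2) 0 = 0 ∨
      pvPair t ((List.range N).foldl
        (fun ml k => ((t.drop k).foldl pvStepB (0, 0, ml)).2.2) 0)) ∧
      ∀ a b : ℕ, a < b → b ≤ t.length → a < N → pvQ t a = pvQ t b →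
        (b : Int) - (a : Int) ≤ (List.range N).foldl
          (fun ml k => ((t.drop k).foldl pvStepB (0, 0, ml)).2.2) 0 := by
  induction N with
  | zero => refine ⟨le_refl 0, Or.inl rfl, fun a b _ _ h _ => absurd h (by omega)⟩
  | succ N ih =>
    rw [List.range_succ, List.foldl_append, List.foldl_cons, List.foldl_nil]
    obtain ⟨h0, hmem, hub⟩ := ih
    set rN := (List.range N).foldl
      (fun ml k => ((t.drop k).foldl pvStepB (0, 0, ml)).2.2) 0 with hrN
    have hle : rN ≤ ((t.drop N).foldl pvStepB (0, 0, rN)).2.2 :=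
      pvB_inner_le (t.drop N) (0, 0, rN)
    refine ⟨le_trans h0 hle, ?_, ?_⟩
    · rcases pvB_inner_mem (t.drop N) 0 0 rN with heq | ⟨c, hc1, hc2, hz, heq⟩
      · rw [heq]; exact hmem
      · right
        rw [List.length_drop] at hc2
        refine ⟨N, N + c, by omega, by omega, ?_, ?_⟩
        · rw [pvQ_add t N c]; omega
        · rw [heq]; push_cast; ring
    · intro a b hab hb haN hq
      by_cases haN' : a < N
      · exact le_trans (hub a b hab hb haN' hq) hle
      · have haeq : a = N := by omega
        subst haeq
        have hub' := pvB_inner_ub (t.drop a) 0 0 rN (b - a) (by omega)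
          (by rw [List.length_drop]; omega)
          (by have := pvQ_add t a (b - a)
              rw [show a + (b - a) = b by omega] at this
              omega)
        have hc : ((b - a : ℕ) : Int) = (b : Int) - (a : Int) := by omega
        omega

lemma pvA_good (s : String) : pvGood s.toList (longest_equal_boys_girls s) := by
  unfold longest_equal_boys_girls
  have hseen0 : ∀ v : Int, (PySem.Dict.ofList [((0 : Int), (-1 : Int))]).get? v =
      pvFirstOcc s.toList 0 v := by
    intro v
    have hlhs : (PySem.Dict.ofList [((0 : Int), (-1 : Int))]).get? v =
        if (0 : Int) = v then some (-1) else none := by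
      simp [PySem.Dict.ofList, PySem.Dict.update, PySem.Dict.get?_insert]
      by_cases hv : v = 0
      · simp [hv]
      · simp [hv]; omega
    have hq0 : pvQ s.toList 0 = 0 := rfl
    rw [hlhs]
    unfold pvFirstOcc
    rw [List.range_one]
    by_cases hv : (0 : Int) = v
    · rw [if_pos hv]
      subst hv
      simp [hq0]
    · rw [if_neg hv]
      have hqv : (pvQ s.toList 0 == v) = false := by
        simp [hq0]; omega
      simp [hqv]
  have h := pvA_loop s.toList s.toList 0 (PySem.Dict.ofList [((0 : Int), (-1 : Int))]) 0
    (by simp) hseen0 (le_refl 0) (Or.inl rfl)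
    (by intro a b hab hb _; omega)
  exact h

lemma pvB_good (s : String) : pvGood s.toList (longest_equal_boys_girls_alt s) := by
  have hshape : longest_equal_boys_girls_alt s =
      (List.range s.toList.length).foldl
        (fun ml k => ((s.toList.drop k).foldl pvStepB (0, 0, ml)).2.2) 0 := by
    unfold longest_equal_boys_girls_alt
    rw [PySem.Str.len_eq, PySem.List.pyRange_one, List.foldl_map]
    simp only [sub_zero, Int.toNat_natCast, zero_add, PySem.List.slice_from_natCast]
  rw [hshape]
  obtain ⟨h0, hmem, hub⟩ := pvB_outer s.toList s.toList.length
  exact ⟨h0, hmem, fun a b hab hb hq => hub a b hab hb (by omega) hq⟩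

-- ===== VERDICT (by name: the statement is the Claim_ definition above) =====
theorem longest_equal_boys_girls_spec : Claim_equal_longest_equal_boys_girls := by
  intro s _
  exact pvGood_unique (pvA_good s) (pvB_good s)
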